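-- pv_equiv track=rewrite | github.com/FDGASOUL/C-AFD | Incorporate_into.py | _calculate_row_benefit
-- ===== SOURCE A (Python) =====
-- def _calculate_row_benefit(row1, row2):
--     """
--     计算两行归并的 benefit。
--     :param row1: 第一行。
--     :param row2: 第二行。
--     :return: 归并带来的 benefit。
--     """
--     benefit = 0
--     for j in range(len(row1)):
--         if row1[j] < 5 and row2[j] < 5:
--             if row1[j] + row2[j] >= 5:
--                 # 两个脏格子合并后变为非脏格子
--                 benefit += 2
--             else:
--                 # 两个脏格子合并仍是脏格子
--                 benefit += 1
--         elif row1[j] < 5 or row2[j] < 5: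
--             # 仅一个是脏格子
--             benefit += 1
--     return benefit
-- ===== SOURCE B (Python) =====
-- def _calculate_row_benefit(row1, row2):
--     dirty = sum(1 for j in range(len(row1)) if row2[j] < 5 or row1[j] < 5)
--     merged_clean = sum(1 for j in range(len(row1))
--                        if row1[j] < 5 and row2[j] < 5 and row1[j] + row2[j] >= 5)
--     return dirty + merged_clean
-- ===== Notes on version B (the rewrite author's own statement) =====
-- stated objective: alternative
-- what changed: Replaces A's single branching accumulation with the sum of two independent counting passes: positions with at least one dirty cell, plus positions where two dirty cells merge into a clean one.
import Mathlib
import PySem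

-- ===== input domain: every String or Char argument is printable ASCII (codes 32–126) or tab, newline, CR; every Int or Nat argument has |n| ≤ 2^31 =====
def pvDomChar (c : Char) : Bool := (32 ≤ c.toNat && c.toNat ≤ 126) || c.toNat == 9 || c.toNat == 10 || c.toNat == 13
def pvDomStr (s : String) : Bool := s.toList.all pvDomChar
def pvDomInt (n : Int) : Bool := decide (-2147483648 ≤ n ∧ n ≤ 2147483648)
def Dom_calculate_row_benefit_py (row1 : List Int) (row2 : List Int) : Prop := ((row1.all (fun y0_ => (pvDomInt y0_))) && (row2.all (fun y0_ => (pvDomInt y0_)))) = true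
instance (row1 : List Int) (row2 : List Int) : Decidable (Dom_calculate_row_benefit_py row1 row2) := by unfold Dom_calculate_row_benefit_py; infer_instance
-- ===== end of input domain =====

-- B computes the benefit as the sum of two independent counting passes (any-dirty count + merge-to-clean count) instead of A's single branching accumulation; objective: alternative decomposition, same cost.


-- ===== PORT A =====
-- Literal port of A's single loop: one running accumulator, branches in source order.
-- row[j] is read with pyGet?; .getD 0 is only reached off Pre_ (where Python raises IndexError).
def calculate_row_benefit_py (row1 : List Int) (row2 : List Int) : Int :=
  (PySem.List.pyRange 0 (Int.ofNat row1.length) 1).foldl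
    (fun benefit j =>
      let a := (PySem.List.pyGet? row1 j).getD 0
      let b := (PySem.List.pyGet? row2 j).getD 0
      if a < 5 ∧ b < 5 then
        if a + b ≥ 5 then benefit + 2 else benefit + 1
      else if a < 5 ∨ b < 5 then benefit + 1
      else benefit) 0

-- ===== PORT B =====
-- Port of Source B: two independent counting passes over the same index range, then add.
def calculate_row_benefit_py_alt (row1 : List Int) (row2 : List Int) : Int :=
  let idx := PySem.List.pyRange 0 (Int.ofNat row1.length) 1
  let dirty := idx.countP (fun j =>
    decide ((PySem.List.pyGet? row2 j).getD 0 < 5 ∨ (PySem.List.pyGet? row1 j).getD 0 < 5))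
  let mergedClean := idx.countP (fun j =>
    decide ((PySem.List.pyGet? row1 j).getD 0 < 5 ∧ (PySem.List.pyGet? row2 j).getD 0 < 5 ∧
            (PySem.List.pyGet? row1 j).getD 0 + (PySem.List.pyGet? row2 j).getD 0 ≥ 5))
  (dirty : Int) + (mergedClean : Int)

-- ===== PRECONDITION & SPEC =====
-- Pre_ excludes exactly the inputs where Python A raises IndexError (row2 shorter than row1).
def Pre_calculate_row_benefit_py (row1 : List Int) (row2 : List Int) : Prop :=
  row1.length ≤ row2.length
instance (row1 : List Int) (row2 : List Int) : Decidable (Pre_calculate_row_benefit_py row1 row2) := by unfold Pre_calculate_row_benefit_py; infer_instance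
def pvWitness_calculate_row_benefit_py : List Int × List Int := ([3, 7, 2], [4, 1, 9])

def Spec_calculate_row_benefit_py (row1 : List Int) (row2 : List Int) (out : Int) : Prop := out = calculate_row_benefit_py_alt row1 row2
instance (row1 : List Int) (row2 : List Int) (out : Int) : Decidable (Spec_calculate_row_benefit_py row1 row2 out) := by unfold Spec_calculate_row_benefit_py; infer_instance

-- ===== CLAIM (what is proved, stated in full; the proofs are below) =====
def Claim_equal_calculate_row_benefit_py : Prop := ∀ (row1 : List Int) (row2 : List Int), Dom_calculate_row_benefit_py row1 row2 → Pre_calculate_row_benefit_py row1 row2 → Spec_calculate_row_benefit_py row1 row2 (calculate_row_benefit_py row1 row2)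

-- ===== LEMMAS AND PROOFS =====
-- The branching step contributes, per index, exactly (1 if any-dirty) + (1 if merge-to-clean).
theorem pv_fold_split (row1 row2 : List Int) (l : List Int) (acc : Int) :
    l.foldl
      (fun benefit j =>
        let a := (PySem.List.pyGet? row1 j).getD 0
        let b := (PySem.List.pyGet? row2 j).getD 0
        if a < 5 ∧ b < 5 then
          if a + b ≥ 5 then benefit + 2 else benefit + 1
        else if a < 5 ∨ b < 5 then benefit + 1
        else benefit) acc
    = acc
      + (l.countP (fun j =>
          decide ((PySem.List.pyGet? row2 j).getD 0 < 5 ∨ (PySem.List.pyGet? row1 j).getD 0 < 5)) : Int)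
      + (l.countP (fun j =>
          decide ((PySem.List.pyGet? row1 j).getD 0 < 5 ∧ (PySem.List.pyGet? row2 j).getD 0 < 5 ∧
                  (PySem.List.pyGet? row1 j).getD 0 + (PySem.List.pyGet? row2 j).getD 0 ≥ 5)) : Int) := by
  induction l generalizing acc with
  | nil => simp
  | cons j t ih =>
    simp only [List.foldl_cons, List.countP_cons, ih]
    set a := (PySem.List.pyGet? row1 j).getD 0 with ha
    set b := (PySem.List.pyGet? row2 j).getD 0 with hb
    by_cases h1 : a < 5 <;> by_cases h2 : b < 5 <;> by_cases h3 : a + b ≥ 5 <;>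
      simp [h1, h2, h3] <;> ring

-- ===== VERDICT (by name: the statement is the Claim_ definition above) =====
theorem calculate_row_benefit_py_spec : Claim_equal_calculate_row_benefit_py := by
  intro row1 row2 _ _
  unfold Spec_calculate_row_benefit_py calculate_row_benefit_py calculate_row_benefit_py_alt
  simp [pv_fold_split]
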